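-- pv_equiv track=rewrite | github.com/Jamin252/bioexam | 2012.3a.ver1.py | numberdifference
-- ===== SOURCE A (Python) =====
-- import copy
--
-- def numberdifference(numfrom, numto):
--     numberfrom = copy.deepcopy(numfrom)
--     numberto = copy.deepcopy(numto)
--     tempto = copy.deepcopy(numberto)
--     tempfrom = copy.deepcopy(numberfrom)
--     for i in tempto:
--         br = False
--         for k in tempfrom:
--             if i == k:
--                 numberto.remove(i)
--                 numberfrom.remove(k)
--                 tempfrom.remove(k)
--                 br = True
--                 break
--     return len(numberto) + len(numberfrom)
-- ===== SOURCE B (Python) =====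
-- def numberdifference(numfrom, numto):
--     a = sorted(numfrom)
--     b = sorted(numto)
--     i = j = matched = 0
--     while i < len(a) and j < len(b):
--         if a[i] == b[j]:
--             matched += 1
--             i += 1
--             j += 1
--         elif a[i] < b[j]:
--             i += 1
--         else:
--             j += 1
--     return len(numfrom) + len(numto) - 2 * matched
-- ===== Notes on version B (the rewrite author's own statement) =====
-- stated objective: faster
-- what changed: Replaced the quadratic nested scan-and-remove over list copies by sorting both lists and counting multiset matches with one two-pointer merge pass, returning len(numfrom)+len(numto)-2*matched.
import Mathlib
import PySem

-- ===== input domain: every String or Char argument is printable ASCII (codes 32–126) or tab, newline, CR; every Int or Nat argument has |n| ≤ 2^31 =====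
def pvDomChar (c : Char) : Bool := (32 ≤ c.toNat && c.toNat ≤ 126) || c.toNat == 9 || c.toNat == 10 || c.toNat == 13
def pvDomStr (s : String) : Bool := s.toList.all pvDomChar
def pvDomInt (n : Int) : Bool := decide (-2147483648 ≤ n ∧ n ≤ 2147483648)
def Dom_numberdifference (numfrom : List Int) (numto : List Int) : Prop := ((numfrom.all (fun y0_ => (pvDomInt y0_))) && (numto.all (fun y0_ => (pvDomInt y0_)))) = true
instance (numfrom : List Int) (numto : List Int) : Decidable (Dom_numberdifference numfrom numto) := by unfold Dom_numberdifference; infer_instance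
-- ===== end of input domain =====

-- B replaces A's quadratic nested remove-and-rescan by sorting both lists and one
-- two-pointer merge counting multiset matches (asymptotically faster); return value only, no mutation.

-- ===== PORT A =====
-- inner 'for k in tempfrom: if i == k: …remove…; break' loop; list.remove(x) is
-- List.erase (exact here: at each remove the element is provably present, so Python never raises).
def pvInnerA (i : Int) (scan : List Int) (numberto numberfrom tempfrom : List Int) :
    List Int × List Int × List Int :=
  match scan with
  | [] => (numberto, numberfrom, tempfrom)
  | k :: rest =>
    if i == k then (numberto.erase i, numberfrom.erase k, tempfrom.erase k)
    else pvInnerA i rest numberto numberfrom tempfrom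

def numberdifference (numfrom : List Int) (numto : List Int) : Int :=
  -- numberfrom/numberto/tempto/tempfrom are value copies; the outer loop iterates tempto (= numto)
  let st := numto.foldl (fun st i => pvInnerA i st.2.2 st.1 st.2.1 st.2.2) (numto, numfrom, numfrom)
  (st.1.length : Int) + (st.2.1.length : Int)

-- ===== PORT B =====
-- the while loop over indices i, j into the two sorted arrays, as recursion on the suffixes
def pvMergeCount : List Int → List Int → Nat
  | [], _ => 0
  | _ :: _, [] => 0
  | x :: xs, y :: ys =>
    if x == y then pvMergeCount xs ys + 1
    else if x < y then pvMergeCount xs (y :: ys)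
    else pvMergeCount (x :: xs) ys

def numberdifference_alt (numfrom : List Int) (numto : List Int) : Int :=
  let a := PySem.List.sorted numfrom (fun x => x) false
  let b := PySem.List.sorted numto (fun x => x) false
  let matched := pvMergeCount a b
  (numfrom.length : Int) + (numto.length : Int) - 2 * (matched : Int)

-- ===== PRECONDITION & SPEC =====
def Spec_numberdifference (numfrom : List Int) (numto : List Int) (out : Int) : Prop := out = numberdifference_alt numfrom numto
instance (numfrom : List Int) (numto : List Int) (out : Int) : Decidable (Spec_numberdifference numfrom numto out) := by unfold Spec_numberdifference; infer_instance

-- ===== CLAIM (what is proved, stated in full; the proofs are below) =====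
def Claim_equal_numberdifference : Prop := ∀ (numfrom : List Int) (numto : List Int), Dom_numberdifference numfrom numto → Spec_numberdifference numfrom numto (numberdifference numfrom numto)

-- ===== LEMMAS AND PROOFS =====

-- abstract greedy match count of A's loop
def pvGreedy : List Int → List Int → Nat
  | [], _ => 0
  | i :: rest, f => if i ∈ f then pvGreedy rest (f.erase i) + 1 else pvGreedy rest f

-- the inner scan either erases i everywhere (first match) or leaves the state alone
lemma pvInnerA_eq (i : Int) (scan nt nf tf : List Int) :
    pvInnerA i scan nt nf tf =
      if i ∈ scan then (nt.erase i, nf.erase i, tf.erase i) else (nt, nf, tf) := by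
  induction scan with
  | nil => simp [pvInnerA]
  | cons k rest ih =>
    by_cases h : i = k
    · subst h; simp [pvInnerA]
    · simp [pvInnerA, h, ih]

-- loop invariant: tempfrom = numberfrom throughout; lengths drop by pvGreedy
lemma pvLoopA (to' : List Int) : ∀ (nt nf : List Int),
    (∀ v : Int, to'.count v ≤ nt.count v) →
    (to'.foldl (fun st i => pvInnerA i st.2.2 st.1 st.2.1 st.2.2) (nt, nf, nf)).1.length
        + pvGreedy to' nf = nt.length ∧
    (to'.foldl (fun st i => pvInnerA i st.2.2 st.1 st.2.1 st.2.2) (nt, nf, nf)).2.1.length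
        + pvGreedy to' nf = nf.length := by
  induction to' with
  | nil => intro nt nf _; simp [pvGreedy]
  | cons i rest ih =>
    intro nt nf hcnt
    have hint : i ∈ nt := by
      have := hcnt i
      simp [List.count_cons_self] at this
      exact List.count_pos_iff.mp (by omega)
    by_cases h : i ∈ nf
    · have hrec := ih (nt.erase i) (nf.erase i) (by
        intro v
        have h1 := hcnt v
        by_cases hv : i = v
        · subst hv
          have hp : 1 ≤ nt.count i := List.count_pos_iff.mpr hint
          simp at h1 ⊢
          omega
        · simp [List.count_erase, hv] at h1 ⊢
          omega)
      rw [List.foldl_cons]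
      rw [pvInnerA_eq]
      simp only [h, if_pos]
      have hlen1 : (nt.erase i).length = nt.length - 1 := List.length_erase_of_mem hint
      have hlen2 : (nf.erase i).length = nf.length - 1 := List.length_erase_of_mem h
      have hnt : 1 ≤ nt.length := List.length_pos_of_mem hint
      have hnf : 1 ≤ nf.length := List.length_pos_of_mem h
      rw [hlen1, hlen2] at hrec
      rw [show pvGreedy (i :: rest) nf = pvGreedy rest (nf.erase i) + 1 from by simp [pvGreedy, h]]
      omega
    · have hrec := ih nt nf (by
        intro v; have := hcnt v; simp [List.count_cons] at this; omega)
      rw [List.foldl_cons]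
      rw [pvInnerA_eq]
      simp only [h, if_false]
      rw [show pvGreedy (i :: rest) nf = pvGreedy rest nf from by simp [pvGreedy, h]]
      exact hrec

-- greedy count = multiset intersection cardinality
lemma pvGreedy_eq_inter (to' : List Int) : ∀ (f : List Int),
    pvGreedy to' f = ((to' : Multiset Int) ∩ (f : Multiset Int)).card := by
  induction to' with
  | nil => intro f; simp [pvGreedy]
  | cons i rest ih =>
    intro f
    by_cases h : i ∈ f
    · rw [show ((i :: rest : List Int) : Multiset Int) = i ::ₘ (rest : Multiset Int) from rfl,
        Multiset.cons_inter_of_pos _ (by simpa using h)]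
      simp [pvGreedy, h, ih, Multiset.coe_erase]
    · rw [show ((i :: rest : List Int) : Multiset Int) = i ::ₘ (rest : Multiset Int) from rfl,
        Multiset.cons_inter_of_neg _ (by simpa using h)]
      simp [pvGreedy, h, ih]

-- merge count on sorted lists = multiset intersection cardinality
lemma pvMergeCount_eq_inter : ∀ (xs ys : List Int),
    xs.Pairwise (· ≤ ·) → ys.Pairwise (· ≤ ·) →
    pvMergeCount xs ys = ((xs : Multiset Int) ∩ (ys : Multiset Int)).card
  | [], ys, _, _ => by simp [pvMergeCount]
  | x :: xs, [], _, _ => by simp [pvMergeCount]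
  | x :: xs, y :: ys, hx, hy => by
    have hx' := (List.pairwise_cons.mp hx).2
    have hy' := (List.pairwise_cons.mp hy).2
    by_cases hxy : x = y
    · subst hxy
      rw [show ((x :: xs : List Int) : Multiset Int) = x ::ₘ (xs : Multiset Int) from rfl,
        Multiset.cons_inter_of_pos _ (by simp)]
      simp only [pvMergeCount, beq_self_eq_true, if_pos]
      rw [pvMergeCount_eq_inter xs ys hx' hy']
      simp [Multiset.coe_erase]
    · by_cases hlt : x < y
      · -- x not in y :: ys
        have hnot : x ∉ (y :: ys) := by
          intro hmem
          simp only [List.mem_cons] at hmem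
          rcases hmem with h | hmem
          · exact hxy h
          · have := (List.pairwise_cons.mp hy).1 x hmem
            omega
        rw [show ((x :: xs : List Int) : Multiset Int) = x ::ₘ (xs : Multiset Int) from rfl,
          Multiset.cons_inter_of_neg _ (by simpa using hnot)]
        simp only [pvMergeCount, hlt, if_pos, beq_iff_eq, hxy, if_false]
        exact pvMergeCount_eq_inter xs (y :: ys) hx' hy
      · -- y < x, y not in x :: xs
        have hgt : y < x := by omega
        have hnot : y ∉ (x :: xs) := by
          intro hmem
          simp only [List.mem_cons] at hmem
          rcases hmem with h | hmem
          · omega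
          · have := (List.pairwise_cons.mp hx).1 y hmem
            omega
        rw [Multiset.inter_comm,
          show ((y :: ys : List Int) : Multiset Int) = y ::ₘ (ys : Multiset Int) from rfl,
          Multiset.cons_inter_of_neg _ (by simpa using hnot)]
        simp only [pvMergeCount, beq_iff_eq, hxy, hlt, if_false]
        rw [pvMergeCount_eq_inter (x :: xs) ys hx hy', Multiset.inter_comm]
  termination_by xs ys => xs.length + ys.length

-- ===== VERDICT (by name: the statement is the Claim_ definition above) =====
theorem numberdifference_spec : Claim_equal_numberdifference := by
  intro numfrom numto _
  unfold Spec_numberdifference numberdifference numberdifference_alt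
  have hA := pvLoopA numto numto numfrom (fun v => le_refl _)
  have hg := pvGreedy_eq_inter numto numfrom
  have hsa : (PySem.List.sorted numfrom (fun x => x) false).Perm numfrom :=
    PySem.List.sorted_perm _ _ _
  have hsb : (PySem.List.sorted numto (fun x => x) false).Perm numto :=
    PySem.List.sorted_perm _ _ _
  have hm := pvMergeCount_eq_inter
    (PySem.List.sorted numfrom (fun x => x) false)
    (PySem.List.sorted numto (fun x => x) false)
    (by simpa using PySem.List.sorted_pairwise (xs := numfrom) (key := fun x => x))
    (by simpa using PySem.List.sorted_pairwise (xs := numto) (key := fun x => x))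
  have hmsa : ((PySem.List.sorted numfrom (fun x => x) false : List Int) : Multiset Int)
      = (numfrom : Multiset Int) := Quot.sound hsa
  have hmsb : ((PySem.List.sorted numto (fun x => x) false : List Int) : Multiset Int)
      = (numto : Multiset Int) := Quot.sound hsb
  rw [hmsa, hmsb, Multiset.inter_comm] at hm
  set g := pvGreedy numto numfrom with hgdef
  have hcard : pvMergeCount (PySem.List.sorted numfrom (fun x => x) false)
      (PySem.List.sorted numto (fun x => x) false) = g := by
    rw [hm, hg]
  simp only [hcard]
  obtain ⟨h1, h2⟩ := hA
  omega
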